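-- pv_equiv track=rewrite | github.com/ccBitTorrent/ccbt | ccbt/interface/splash/animation_helpers.py | group_characters_by_spaces
-- ===== SOURCE A (Python) =====
-- def group_characters_by_spaces(line: str) -> list[tuple[int, int, str]]:
--     """Group characters in a line by spaces (word boundaries).
--
--     Args:
--         line: Text line
--
--     Returns:
--         List of (start_idx, end_idx, group_text) tuples
--     """
--     groups = []
--     start_idx = 0
--     in_group = False
--
--     for i, char in enumerate(line):
--         if char != " " and not in_group:
--             # Start of a new group
--             start_idx = i
--             in_group = True
--         elif char == " " and in_group:
--             # End of current group
--             groups.append((start_idx, i, line[start_idx:i]))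
--             in_group = False
--
--     # Handle group at end of line
--     if in_group:
--         groups.append((start_idx, len(line), line[start_idx:]))
--
--     return groups
-- ===== SOURCE B (Python) =====
-- def group_characters_by_spaces(line: str) -> list[tuple[int, int, str]]:
--     """Group characters in a line by spaces (word boundaries)."""
--     groups = []
--     pos = 0
--     for word in line.split(" "):
--         if word:
--             groups.append((pos, pos + len(word), word))
--         pos += len(word) + 1
--     return groups
-- ===== Notes on version B (the rewrite author's own statement) =====
-- stated objective: idiomatic
-- what changed: Replaces the manual in_group/start_idx state machine over enumerate(line) with one pass over the pieces of line.split(' '), tracking each piece's start offset and keeping the non-empty pieces.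
import Mathlib
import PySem

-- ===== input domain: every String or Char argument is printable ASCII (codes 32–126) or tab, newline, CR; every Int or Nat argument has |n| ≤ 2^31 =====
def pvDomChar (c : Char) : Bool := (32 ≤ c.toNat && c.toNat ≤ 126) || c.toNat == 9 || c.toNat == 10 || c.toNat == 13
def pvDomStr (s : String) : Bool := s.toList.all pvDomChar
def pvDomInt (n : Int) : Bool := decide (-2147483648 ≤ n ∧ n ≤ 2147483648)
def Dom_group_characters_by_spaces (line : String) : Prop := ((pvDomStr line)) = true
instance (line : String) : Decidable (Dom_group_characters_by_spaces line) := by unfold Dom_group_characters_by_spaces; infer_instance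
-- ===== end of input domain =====

-- B replaces A's per-character in_group state machine by one pass over line.split(' ') (idiomatic; measured faster in a timing run).

-- ===== PORT A =====
-- loop body: state (groups, start_idx, in_group), p = (i, char)
def pvStepA (L : List Char) (st : List (Int × Int × String) × Int × Bool) (p : Int × Char) :
    List (Int × Int × String) × Int × Bool :=
  if p.2 ≠ ' ' ∧ st.2.2 = false then
    (st.1, p.1, true)
  else if p.2 = ' ' ∧ st.2.2 = true then
    (st.1 ++ [(st.2.1, p.1, String.ofList (PySem.List.slice L (some st.2.1) (some p.1)))], st.2.1, false)
  else st

-- the trailing "if in_group" after the loop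
def pvFinA (L : List Char) (st : List (Int × Int × String) × Int × Bool) :
    List (Int × Int × String) :=
  if st.2.2 then
    st.1 ++ [(st.2.1, (L.length : Int), String.ofList (PySem.List.slice L (some st.2.1) none))]
  else st.1

def group_characters_by_spaces (line : String) : List (Int × Int × String) :=
  pvFinA line.toList
    ((PySem.List.enumerate line.toList 0).foldl (pvStepA line.toList) ([], 0, false))

-- ===== PORT B =====
-- loop body: state (groups, pos), one word of line.split(' ')
def pvStepB (st : List (Int × Int × String) × Int) (word : List Char) :
    List (Int × Int × String) × Int :=
  (if word ≠ [] then st.1 ++ [(st.2, st.2 + (word.length : Int), String.ofList word)] else st.1,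
   st.2 + word.length + 1)

def group_characters_by_spaces_alt (line : String) : List (Int × Int × String) :=
  ((PySem.Chars.splitOn line.toList [' ']).foldl pvStepB ([], 0)).1

-- ===== PRECONDITION & SPEC =====
def Spec_group_characters_by_spaces (line : String) (out : List (Int × Int × String)) : Prop := out = group_characters_by_spaces_alt line
instance (line : String) (out : List (Int × Int × String)) : Decidable (Spec_group_characters_by_spaces line out) := by unfold Spec_group_characters_by_spaces; infer_instance

-- ===== CLAIM (what is proved, stated in full; the proofs are below) =====
def Claim_equal_group_characters_by_spaces : Prop := ∀ (line : String), Dom_group_characters_by_spaces line → Spec_group_characters_by_spaces line (group_characters_by_spaces line)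

-- ===== LEMMAS AND PROOFS =====

-- common reference: the word groups of cs, where i is cs's offset in the full line
def pvWords : List Char → Nat → List (Int × Int × String)
  | [], _ => []
  | c :: rest, i =>
    if c = ' ' then pvWords rest (i + 1)
    else
      ((i : Int), ((i + 1 + (List.takeWhile (· ≠ ' ') rest).length : Nat) : Int),
        String.ofList (c :: List.takeWhile (· ≠ ' ') rest)) ::
        pvWords (List.dropWhile (· ≠ ' ') rest) (i + 1 + (List.takeWhile (· ≠ ' ') rest).length)
termination_by cs => cs.length
decreasing_by
  · simp
  · have := List.length_dropWhile_le (· ≠ ' ') rest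
    simp only [List.length_cons]; omega

-- pure-recursion characterisation of splitOn · [' ']
def pvSp (pre : List Char) : List Char → List (List Char)
  | [] => [pre]
  | c :: rest => if c = ' ' then pre :: pvSp [] rest else pvSp (pre ++ [c]) rest

theorem pvSplitOn_go (cs : List Char) : ∀ (fuel : Nat) (cur : List Char) (acc : List (List Char)),
    cs.length < fuel →
    PySem.Chars.splitOn.go [' '] fuel cs cur acc = acc.reverse ++ pvSp cur.reverse cs := by
  induction cs with
  | nil =>
    intro fuel cur acc h
    cases fuel with
    | zero => omega
    | succ f => simp [PySem.Chars.splitOn.go, pvSp]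
  | cons c rest ih =>
    intro fuel cur acc h
    cases fuel with
    | zero => omega
    | succ f =>
      by_cases hc : c = ' '
      · subst hc
        rw [show PySem.Chars.splitOn.go [' '] (f + 1) (' ' :: rest) cur acc
              = PySem.Chars.splitOn.go [' '] f rest [] (cur.reverse :: acc) by
            simp [PySem.Chars.splitOn.go]]
        rw [ih f [] (cur.reverse :: acc) (by simp at h; omega)]
        simp [pvSp]
      · rw [show PySem.Chars.splitOn.go [' '] (f + 1) (c :: rest) cur acc
              = PySem.Chars.splitOn.go [' '] f rest (c :: cur) acc by
            simp [PySem.Chars.splitOn.go, Ne.symm hc]]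
        rw [ih f (c :: cur) acc (by simp at h; omega)]
        simp [pvSp, hc]

theorem pvSplitOn_eq (cs : List Char) : PySem.Chars.splitOn cs [' '] = pvSp [] cs := by
  rw [PySem.Chars.splitOn, pvSplitOn_go cs (cs.length + 1) [] [] (by omega)]
  simp

-- head of dropWhile fails the predicate, so pvWords may step over it
theorem pvWords_dropWhile_shift (cs : List Char) (j : Nat) :
    pvWords (List.dropWhile (· ≠ ' ') cs) j =
      pvWords ((List.dropWhile (· ≠ ' ') cs).drop 1) (j + 1) := by
  induction cs with
  | nil => simp [pvWords]
  | cons c rest ih =>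
    by_cases hc : c = ' '
    · subst hc; simp [List.dropWhile, pvWords]
    · simpa [List.dropWhile, hc] using ih

-- B side: the fold over the split pieces computes pvWords
theorem pvB (cs : List Char) :
    (∀ (i : Nat) (g : List (Int × Int × String)),
      ((pvSp [] cs).foldl pvStepB (g, (i : Int))).1 = g ++ pvWords cs i) ∧
    (∀ (pre : List Char) (s : Nat) (g : List (Int × Int × String)), pre ≠ [] →
      ((pvSp pre cs).foldl pvStepB (g, (s : Int))).1 =
        g ++ ((s : Int), ((s + pre.length + (List.takeWhile (· ≠ ' ') cs).length : Nat) : Int),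
              String.ofList (pre ++ List.takeWhile (· ≠ ' ') cs)) ::
            pvWords ((List.dropWhile (· ≠ ' ') cs).drop 1)
              (s + pre.length + (List.takeWhile (· ≠ ' ') cs).length + 1)) := by
  induction cs with
  | nil =>
    refine ⟨fun i g => by simp [pvSp, pvStepB, pvWords], fun pre s g hne => ?_⟩
    simp [pvSp, pvStepB, pvWords, hne, Nat.cast_add]
  | cons c rest ih =>
    refine ⟨fun i g => ?_, fun pre s g hne => ?_⟩
    · by_cases hc : c = ' '
      · subst hc
        rw [show pvSp [] (' ' :: rest) = [] :: pvSp [] rest by simp [pvSp]]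
        rw [List.foldl_cons,
          show pvStepB (g, (i : Int)) [] = (g, ((i + 1 : Nat) : Int)) by simp [pvStepB]]
        rw [ih.1 (i + 1) g]
        simp [pvWords]
      · rw [show pvSp [] (c :: rest) = pvSp [c] rest by simp [pvSp, hc]]
        rw [ih.2 [c] i g (by simp)]
        simp only [pvWords, if_neg hc]
        rw [pvWords_dropWhile_shift rest]
        simp [Nat.add_assoc]
    · by_cases hc : c = ' '
      · subst hc
        rw [show pvSp pre (' ' :: rest) = pre :: pvSp [] rest by simp [pvSp]]
        rw [List.foldl_cons,
          show pvStepB (g, (s : Int)) pre =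
              (g ++ [((s : Int), ((s + pre.length : Nat) : Int), String.ofList pre)],
               ((s + pre.length + 1 : Nat) : Int)) by simp [pvStepB, hne, Nat.cast_add]]
        rw [ih.1 (s + pre.length + 1) _]
        simp [List.append_assoc]
      · rw [show pvSp pre (c :: rest) = pvSp (pre ++ [c]) rest by simp [pvSp, hc]]
        rw [ih.2 (pre ++ [c]) s g (by simp)]
        simp [hc, List.append_assoc, Nat.add_assoc, Nat.add_comm, Nat.add_left_comm]

-- A side: the state machine computes pvWords
theorem pvA (L : List Char) (cs : List Char) :
    (∀ (k : Nat) (g : List (Int × Int × String)) (s0 : Int), L.drop k = cs →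
      pvFinA L ((PySem.List.enumerate cs (k : Int)).foldl (pvStepA L) (g, s0, false)) =
        g ++ pvWords cs k) ∧
    (∀ (s : Nat) (wpre : List Char) (g : List (Int × Int × String)), wpre ≠ [] →
      L.drop s = wpre ++ cs →
      pvFinA L ((PySem.List.enumerate cs ((s + wpre.length : Nat) : Int)).foldl
          (pvStepA L) (g, (s : Int), true)) =
        g ++ ((s : Int), ((s + wpre.length + (List.takeWhile (· ≠ ' ') cs).length : Nat) : Int),
              String.ofList (wpre ++ List.takeWhile (· ≠ ' ') cs)) ::
            pvWords (List.dropWhile (· ≠ ' ') cs)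
              (s + wpre.length + (List.takeWhile (· ≠ ' ') cs).length)) := by
  induction cs with
  | nil =>
    refine ⟨fun k g s0 h => by simp [PySem.List.enumerate_nil, pvFinA, pvWords], fun s wpre g hne hend => ?_⟩
    rw [List.append_nil] at hend
    have hw : 0 < wpre.length := List.length_pos_iff.mpr hne
    have hsl : s < L.length := by
      by_contra hs
      have hnil : List.drop s L = [] := List.drop_eq_nil_of_le (by omega)
      rw [hnil] at hend; exact hne hend.symm
    have hLlen : L.length = s + wpre.length := by
      have h2 := congrArg List.length hend
      simp only [List.length_drop] at h2
      omega
    rw [PySem.List.enumerate_nil, List.foldl_nil]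
    simp only [pvFinA]
    rw [PySem.List.slice_from_natCast, hend]
    simp [pvWords, hLlen]
  | cons c rest ih =>
    refine ⟨fun k g s0 h => ?_, fun s wpre g hne hend => ?_⟩
    · have hdrop : L.drop (k + 1) = rest := by
        have h2 := congrArg (List.drop 1) h
        rw [List.drop_drop] at h2
        simpa [Nat.add_comm] using h2
      rw [PySem.List.enumerate_cons, List.foldl_cons]
      by_cases hc : c = ' '
      · subst hc
        rw [show pvStepA L (g, s0, false) ((k : Int), ' ') = (g, s0, false) by simp [pvStepA]]
        rw [show ((k : Int) + 1) = ((k + 1 : Nat) : Int) by push_cast; ring]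
        rw [ih.1 (k + 1) g s0 hdrop]
        simp [pvWords]
      · rw [show pvStepA L (g, s0, false) ((k : Int), c) = (g, (k : Int), true) by
          simp [pvStepA, hc]]
        rw [show ((k : Int) + 1) = ((k + [c].length : Nat) : Int) by push_cast; simp]
        rw [ih.2 k [c] g (by simp) (by simpa using h)]
        simp [pvWords, hc, Nat.add_assoc]
    · have hdrop : L.drop (s + wpre.length + 1) = rest := by
        have h2 := congrArg (List.drop (wpre.length + 1)) hend
        rw [List.drop_drop] at h2
        rw [show s + (wpre.length + 1) = s + wpre.length + 1 by omega] at h2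
        rw [show wpre ++ c :: rest = (wpre ++ [c]) ++ rest by simp] at h2
        rw [show wpre.length + 1 = (wpre ++ [c]).length by simp] at h2
        rw [List.drop_left] at h2
        exact h2
      rw [PySem.List.enumerate_cons, List.foldl_cons]
      by_cases hc : c = ' '
      · subst hc
        rw [show pvStepA L (g, (s : Int), true) (((s + wpre.length : Nat) : Int), ' ')
              = (g ++ [((s : Int), ((s + wpre.length : Nat) : Int),
                  String.ofList (PySem.List.slice L (some (s : Int))
                    (some ((s + wpre.length : Nat) : Int))))], (s : Int), false) by
            simp [pvStepA]]
        rw [show ((s + wpre.length : Nat) : Int) = ((s : Int) + (wpre.length : Int)) by push_cast; ring,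
          PySem.List.slice_natCast_add, hend]
        rw [show (wpre ++ ' ' :: rest).take wpre.length = wpre by simp]
        rw [show ((s : Int) + (wpre.length : Int) + 1) = ((s + wpre.length + 1 : Nat) : Int) by
          push_cast; ring]
        rw [ih.1 (s + wpre.length + 1) _ (s : Int) hdrop]
        simp [pvWords, List.append_assoc]
      · rw [show pvStepA L (g, (s : Int), true) (((s + wpre.length : Nat) : Int), c)
              = (g, (s : Int), true) by simp [pvStepA, hc]]
        rw [show (((s + wpre.length : Nat) : Int) + 1) = ((s + (wpre ++ [c]).length : Nat) : Int) by
          push_cast; simp; ring]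
        rw [ih.2 s (wpre ++ [c]) g (by simp) (by simpa [List.append_assoc] using hend)]
        simp [hc, List.append_assoc, Nat.add_assoc, Nat.add_comm]

-- ===== VERDICT (by name: the statement is the Claim_ definition above) =====
theorem group_characters_by_spaces_spec : Claim_equal_group_characters_by_spaces := by
  intro line _
  unfold Spec_group_characters_by_spaces group_characters_by_spaces group_characters_by_spaces_alt
  rw [pvSplitOn_eq]
  have hB := (pvB line.toList).1 0 []
  have hA := (pvA line.toList line.toList).1 0 [] 0 (by simp)
  simp only [Nat.cast_zero] at hB hA
  rw [hA, hB]
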